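-- pv_equiv track=rewrite | github.com/lagunerio/daily-algorithm | programmers/python/20220314-2.py | solution
-- ===== SOURCE A (Python) =====
-- def zipper(blocks, block_str, count=1):
-- 	if len(blocks) < 1:
-- 		return blocks, count
--
-- 	if blocks[0] == block_str:
-- 		blocks, count = zipper(blocks[1:], block_str, count+1)
--
-- 	return blocks, count
--
-- def solution(s):
-- 	answer = len_s = len(s)
-- 	for block_len in range(1, len_s//2+1):
-- 		whats_left = ""
-- 		blocks = [s[idx*block_len:idx*block_len+block_len] for idx in range(len_s//block_len)]
-- 		if len_s%block_len > 0:
-- 			whats_left = s[(-1)*(len_s%block_len):]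
-- 		blocks = [s[idx*block_len:idx*block_len+block_len] for idx in range(len_s//block_len)]
-- 		zipped, block, count = "", "", 0
-- 		while blocks:
-- 			block, blocks = blocks[0], blocks[1:]
-- 			blocks, count = zipper(blocks, block)
-- 			if count == 1:
-- 				zipped += f"{block}"
-- 			else:
-- 				zipped += f"{count}{block}"
-- 		zipped += whats_left
--
-- 		if len(zipped) < answer:
-- 			answer = len(zipped)
--
-- 	return answer
-- ===== SOURCE B (Python) =====
-- def solution(s):
--     n = len(s)
--     best = n
--     for bl in range(1, n // 2 + 1):
--         blocks = [s[i * bl:(i + 1) * bl] for i in range(n // bl)]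
--         total = n % bl
--         while blocks:
--             first = blocks[0]
--             run = 1
--             while run < len(blocks) and blocks[run] == first:
--                 run += 1
--             total += bl + (len(str(run)) if run > 1 else 0)
--             blocks = blocks[run:]
--         best = min(best, total)
--     return best
-- ===== Notes on version B (the rewrite author's own statement) =====
-- stated objective: simpler
-- what changed: B drops the recursive zipper helper and the intermediate compressed string: it counts each run of equal blocks with an inner index loop and accumulates the compressed LENGTH arithmetically (block length plus digit count of the run), never building the zipped string.
import Mathlib
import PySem

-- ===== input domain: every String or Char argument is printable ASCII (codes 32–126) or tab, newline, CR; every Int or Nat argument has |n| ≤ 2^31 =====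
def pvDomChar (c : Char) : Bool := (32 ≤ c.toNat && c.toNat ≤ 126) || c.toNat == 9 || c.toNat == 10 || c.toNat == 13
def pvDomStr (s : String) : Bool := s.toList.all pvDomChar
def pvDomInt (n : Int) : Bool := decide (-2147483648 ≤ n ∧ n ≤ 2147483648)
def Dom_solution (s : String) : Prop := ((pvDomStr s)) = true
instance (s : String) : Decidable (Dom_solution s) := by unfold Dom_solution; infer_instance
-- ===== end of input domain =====

-- B replaces A's recursive zipper + built-up compressed string by direct run counting
-- and arithmetic accumulation of the compressed length (return value equivalence).
-- (A also hits Python's recursion limit on inputs with ~1000 equal consecutive blocks;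
-- the Lean port of A is total, so nothing is claimed about that resource limit.)

-- ===== PORT A =====
-- termination fact for aLoop (cited in its decreasing_by)
def zipperA (blocks : List (List Char)) (bstr : List Char) (count : Int) :
    List (List Char) × Int :=
  match blocks with
  | [] => ([], count)
  | b :: rest => if b = bstr then zipperA rest bstr (count + 1) else (b :: rest, count)

theorem zipperA_fst_len (blocks : List (List Char)) (bstr : List Char) (count : Int) :
    (zipperA blocks bstr count).1.length ≤ blocks.length := by
  induction blocks generalizing count with
  | nil => simp [zipperA]
  | cons b rest ih =>
    simp only [zipperA]
    split
    · exact le_trans (ih _) (by simp)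
    · simp

-- A's while loop: pop a block, zip off its repeats, append the piece to `zipped`
def aLoop (blocks : List (List Char)) (zipped : List Char) : List Char :=
  match blocks with
  | [] => zipped
  | block :: rest =>
    aLoop (zipperA rest block 1).1
      (zipped ++ (if (zipperA rest block 1).2 = 1 then block
                  else PySem.Int.toChars (zipperA rest block 1).2 ++ block))
termination_by blocks.length
decreasing_by
  have := zipperA_fst_len rest block 1
  simp; omega

def solution (s : String) : Int :=
  let cs := s.toList
  let len_s : Int := cs.length
  (PySem.List.pyRange 1 (PySem.Int.floordiv len_s 2 + 1) 1).foldl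
    (fun answer block_len =>
      -- whats_left = "" unless there is a remainder tail; the blocks comprehension
      -- appears twice in A with the identical value, so it is bound once here
      let blocks := (PySem.List.pyRange 0 (PySem.Int.floordiv len_s block_len) 1).map
        (fun idx => PySem.List.slice cs (some (idx * block_len)) (some (idx * block_len + block_len)))
      let whats_left : List Char :=
        if PySem.Int.mod len_s block_len > 0 then
          PySem.List.slice cs (some ((-1) * PySem.Int.mod len_s block_len)) none
        else []
      let zipped := aLoop blocks [] ++ whats_left
      if (zipped.length : Int) < answer then (zipped.length : Int) else answer)
    len_s

-- ===== PORT B =====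
-- inner `while run < len(blocks) and blocks[run] == first` loop: leading equal count
def bRun (first : List Char) : List (List Char) → Nat
  | [] => 0
  | b :: rest => if b = first then 1 + bRun first rest else 0

-- B's while loop over the block list, accumulating the compressed length
def bLoop (bl : Int) (blocks : List (List Char)) (total : Int) : Int :=
  match blocks with
  | [] => total
  | first :: rest =>
    let run : Nat := 1 + bRun first rest
    bLoop bl (rest.drop (run - 1))
      (total + bl + (if run > 1 then ((PySem.Int.toChars (run : Int)).length : Int) else 0))
termination_by blocks.length
decreasing_by simp

def solution_alt (s : String) : Int :=
  let cs := s.toList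
  let n : Int := cs.length
  (PySem.List.pyRange 1 (PySem.Int.floordiv n 2 + 1) 1).foldl
    (fun best bl =>
      let blocks := (PySem.List.pyRange 0 (PySem.Int.floordiv n bl) 1).map
        (fun i => PySem.List.slice cs (some (i * bl)) (some ((i + 1) * bl)))
      min best (bLoop bl blocks (PySem.Int.mod n bl)))
    n

-- ===== PRECONDITION & SPEC =====
def Spec_solution (s : String) (out : Int) : Prop := out = solution_alt s
instance (s : String) (out : Int) : Decidable (Spec_solution s out) := by unfold Spec_solution; infer_instance

-- ===== CLAIM (what is proved, stated in full; the proofs are below) =====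
def Claim_equal_solution : Prop := ∀ (s : String), Dom_solution s → Spec_solution s (solution s)

-- ===== LEMMAS AND PROOFS =====

theorem bRun_le (first : List Char) (l : List (List Char)) : bRun first l ≤ l.length := by
  induction l with
  | nil => simp [bRun]
  | cons b rest ih =>
    simp only [bRun]
    split
    · simp; omega
    · simp

theorem zipperA_eq (blocks : List (List Char)) (bstr : List Char) (c : Int) :
    zipperA blocks bstr c = (blocks.drop (bRun bstr blocks), c + (bRun bstr blocks : Int)) := by
  induction blocks generalizing c with
  | nil => simp [zipperA, bRun]
  | cons b rest ih =>
    simp only [zipperA, bRun]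
    split
    · rw [ih]
      rw [Nat.add_comm 1 (bRun bstr rest), List.drop_succ_cons]
      simp only [Prod.mk.injEq, true_and]
      push_cast; ring
    · simp

-- the crux: A's string length accumulation equals B's arithmetic accumulation
theorem aLoop_len (bl : Int) :
    ∀ m (blocks : List (List Char)), blocks.length = m →
      (∀ b ∈ blocks, (b.length : Int) = bl) →
      ∀ (zipped : List Char) (total : Int),
        ((aLoop blocks zipped).length : Int) + total
          = (zipped.length : Int) + bLoop bl blocks total := by
  intro m
  induction m using Nat.strong_induction_on with
  | _ m ih =>
    intro blocks hm hlen zipped total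
    match blocks with
    | [] => rw [aLoop.eq_def, bLoop.eq_def]
    | block :: rest =>
      rw [aLoop.eq_def, bLoop.eq_def]
      simp only [zipperA_eq]
      have hk := bRun_le block rest
      simp only [List.length_cons] at hm
      have h1 : (1 + bRun block rest - 1) = bRun block rest := by omega
      rw [h1]
      have hb : (block.length : Int) = bl := hlen block List.mem_cons_self
      have hlen' : ∀ b ∈ rest.drop (bRun block rest), (b.length : Int) = bl :=
        fun b hb' => hlen b (List.mem_cons_of_mem _ (List.mem_of_mem_drop hb'))
      have hcast : ((1 + bRun block rest : Nat) : Int) = 1 + (bRun block rest : Int) := by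
        push_cast; ring
      rw [hcast]
      by_cases h0 : bRun block rest = 0
      · have hlt : rest.length < m := by omega
        have hrec := ih rest.length hlt rest rfl (by simpa [h0] using hlen')
          (zipped ++ block) (total + bl)
        simp only [h0, Nat.cast_zero, add_zero, List.drop_zero, List.length_append] at *
        norm_num at hrec ⊢
        omega
      · have hlt : (rest.drop (bRun block rest)).length < m := by
          simp only [List.length_drop]; omega
        have hne : (1 : Int) + (bRun block rest : Int) ≠ 1 := by omega
        have hgt : 1 + bRun block rest > 1 := by omega
        rw [if_neg hne, if_pos hgt]
        have hrec := ih (rest.drop (bRun block rest)).length hlt _ rfl hlen'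
          (zipped ++ (PySem.Int.toChars (1 + (bRun block rest : Int)) ++ block))
          (total + bl + ((PySem.Int.toChars (1 + (bRun block rest : Int))).length : Int))
        simp only [List.length_append] at hrec ⊢
        push_cast at hrec ⊢
        omega

-- each full block slice has length exactly bl
theorem slice_block_len (cs : List Char) (a bl : Int) (ha : 0 ≤ a) (hbl : 0 ≤ bl)
    (hend : a + bl ≤ (cs.length : Int)) :
    ((PySem.List.slice cs (some a) (some (a + bl))).length : Int) = bl := by
  rw [PySem.List.slice_toNat cs ha (by omega)]
  simp [List.length_take, List.length_drop]
  omega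

-- ===== VERDICT (by name: the statement is the Claim_ definition above) =====
theorem solution_spec : Claim_equal_solution := by
  intro s _
  unfold Spec_solution solution solution_alt
  simp only []
  set cs := s.toList with hcs
  set n : Int := (cs.length : Int) with hn
  apply PySem.List.foldl_congr_mem
  intro answer bl hbl
  rw [PySem.List.mem_pyRange_one] at hbl
  have hblpos : 0 < bl := by omega
  -- the two block lists are the same
  have hblocks :
      (PySem.List.pyRange 0 (PySem.Int.floordiv n bl) 1).map
        (fun idx => PySem.List.slice cs (some (idx * bl)) (some (idx * bl + bl)))
      = (PySem.List.pyRange 0 (PySem.Int.floordiv n bl) 1).map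
        (fun i => PySem.List.slice cs (some (i * bl)) (some ((i + 1) * bl))) := by
    apply List.map_congr_left
    intro i _
    have : (i + 1) * bl = i * bl + bl := by ring
    rw [this]
  set blocks := (PySem.List.pyRange 0 (PySem.Int.floordiv n bl) 1).map
    (fun idx => PySem.List.slice cs (some (idx * bl)) (some (idx * bl + bl))) with hbdef
  rw [← hblocks]
  -- every block has length bl
  have hlen : ∀ b ∈ blocks, (b.length : Int) = bl := by
    intro b hb
    rw [hbdef, List.mem_map] at hb
    obtain ⟨i, hi, rfl⟩ := hb
    rw [PySem.List.mem_pyRange_one] at hi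
    have hi0 : 0 ≤ i := hi.1
    have hiub : i + 1 ≤ PySem.Int.floordiv n bl := by omega
    have := (PySem.Int.le_floordiv_iff_mul_le (a := n) (b := bl) (q := i + 1) hblpos).mp hiub
    exact slice_block_len cs (i * bl) bl (by positivity) (by omega) (by nlinarith)
  -- remainder facts
  have hrem0 : 0 ≤ PySem.Int.mod n bl := PySem.Int.mod_nonneg n hblpos
  have hremlt : PySem.Int.mod n bl < bl := PySem.Int.mod_lt n hblpos
  have hbln : bl ≤ n := by
    have := PySem.Int.floordiv_mul_add_mod n 2
    have h2 := PySem.Int.mod_nonneg n (b := 2) (by omega)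
    have h3 := PySem.Int.mod_lt n (b := 2) (by omega)
    omega
  -- length of whats_left = remainder
  have hwl : ((if PySem.Int.mod n bl > 0 then
        PySem.List.slice cs (some ((-1) * PySem.Int.mod n bl)) none else []).length : Int)
      = PySem.Int.mod n bl := by
    split
    · next hpos =>
      have hk : (-1) * PySem.Int.mod n bl = -(((PySem.Int.mod n bl).toNat : Nat) : Int) := by omega
      rw [hk, PySem.List.slice_from_neg_natCast cs ((PySem.Int.mod n bl).toNat) (by omega)]
      simp [List.length_drop]
      omega
    · next hpos => simp; omega
  -- assemble
  have hmain := aLoop_len bl blocks.length blocks rfl hlen [] (PySem.Int.mod n bl)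
  simp only [List.length_nil, Nat.cast_zero, zero_add] at hmain
  have hz : ((aLoop blocks [] ++ (if PySem.Int.mod n bl > 0 then
        PySem.List.slice cs (some ((-1) * PySem.Int.mod n bl)) none else [])).length : Int)
      = bLoop bl blocks (PySem.Int.mod n bl) := by
    rw [List.length_append]
    push_cast
    omega
  rw [hz]
  rw [min_def]
  split <;> split <;> omega
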